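-- pv_equiv track=rewrite | github.com/thanhbkk19/MenuExtraction | test.py | match_price
-- ===== SOURCE A (Python) =====
-- def match_price(dishes,prices):
--     Vietnamese_dish = []
--     price_list = []
--     for dish in dishes:
--         if len(prices)==0:
--             Vietnamese_dish.append(dish[0])
--             price_list.append("NOT GIVEN")
--             continue
--         distance = [(dish[1][0]-price[1][0])**2+(dish[1][1]-price[1][1])**2 for price in prices]
--         inde = distance.index(min(distance))
--         Vietnamese_dish.append(dish[0])
--         price_list.append(prices[inde][0])
--
--     return Vietnamese_dish, price_list
-- ===== SOURCE B (Python) =====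
-- def match_price(dishes, prices):
--     # Price-major traversal: one pass per price updating per-dish running bests,
--     # instead of A's dish-major distance-list / min / .index pipeline.
--     names = [dish[0] for dish in dishes]
--     if not prices:
--         return names, ["NOT GIVEN"] * len(dishes)
--     best_d = [None] * len(dishes)
--     best_name = [""] * len(dishes)
--     for pname, (px, py) in prices:
--         for i, (_, (x, y)) in enumerate(dishes):
--             d = (x - px) ** 2 + (y - py) ** 2
--             if best_d[i] is None or d < best_d[i]:
--                 best_d[i] = d
--                 best_name[i] = pname
--     return names, best_name
-- ===== Notes on version B (the rewrite author's own statement) =====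
-- stated objective: alternative
-- what changed: Transposes the iteration: instead of A's dish-major scan that builds a full distance list per dish and rescans it with min() and .index(), B iterates price-major, making one pass per price that updates per-dish running best-distance/best-name arrays (strict < keeps the first-price tie-break); names come from one comprehension and empty prices is a single replicated list.
import Mathlib
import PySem

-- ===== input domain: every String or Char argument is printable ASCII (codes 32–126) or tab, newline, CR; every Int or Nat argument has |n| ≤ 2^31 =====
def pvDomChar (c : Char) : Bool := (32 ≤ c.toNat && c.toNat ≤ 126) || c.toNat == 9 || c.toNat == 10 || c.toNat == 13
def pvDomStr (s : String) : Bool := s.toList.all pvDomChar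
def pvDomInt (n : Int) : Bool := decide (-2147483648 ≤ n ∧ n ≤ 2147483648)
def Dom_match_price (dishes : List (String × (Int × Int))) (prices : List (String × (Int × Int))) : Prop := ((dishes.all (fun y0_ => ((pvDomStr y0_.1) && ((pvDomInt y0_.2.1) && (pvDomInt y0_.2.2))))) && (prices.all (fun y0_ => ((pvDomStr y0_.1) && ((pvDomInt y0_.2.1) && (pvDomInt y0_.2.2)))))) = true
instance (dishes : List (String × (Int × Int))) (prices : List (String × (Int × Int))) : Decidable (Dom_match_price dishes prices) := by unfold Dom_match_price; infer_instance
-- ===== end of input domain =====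

-- B transposes the traversal: instead of A's dish-major distance-list / min / .index pipeline
-- it iterates price-major, updating per-dish running best arrays; objective: alternative.

-- ===== PORT A =====
-- Literal port of A: foldl over dishes appending to the two result lists; per dish a distance
-- list (map), min(distance), distance.index(min), prices[inde].  The .getD fallbacks are
-- totality guards only: in the else-branch prices (hence distance) is nonempty, so
-- min?/index?/pyGet? all return some.
def match_price (dishes : List (String × (Int × Int))) (prices : List (String × (Int × Int))) : List String × List String :=
  dishes.foldl (fun acc dish =>
    if prices.length == 0 then
      (acc.1 ++ [dish.1], acc.2 ++ ["NOT GIVEN"])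
    else
      let distance := prices.map (fun price => (dish.2.1 - price.2.1)^2 + (dish.2.2 - price.2.2)^2)
      let m := (PySem.List.min? distance (fun d => d)).getD 0
      let inde := (PySem.List.index? distance m).getD 0
      (acc.1 ++ [dish.1], acc.2 ++ [((PySem.List.pyGet? prices (inde : Int)).getD ("", 0, 0)).1]))
    ([], [])

-- ===== PORT B =====
-- B's inner-loop body: update one dish's running state (best_d, best_name) with one price.
def pvUpd (p : String × (Int × Int)) (dish : String × (Int × Int)) (st : Option Int × String) : Option Int × String :=
  let d := (dish.2.1 - p.2.1)^2 + (dish.2.2 - p.2.2)^2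
  match st.1 with
  | none => (some d, p.1)
  | some bd => if d < bd then (some d, p.1) else st

-- one pass of B's outer loop: elementwise update of the per-dish state arrays by one price
def pvPricePass (dishes : List (String × (Int × Int))) (st : List (Option Int × String)) (p : String × (Int × Int)) : List (Option Int × String) :=
  (dishes.zip st).map (fun ds => pvUpd p ds.1 ds.2)

def match_price_alt (dishes : List (String × (Int × Int))) (prices : List (String × (Int × Int))) : List String × List String :=
  let names := dishes.map (fun d => d.1)
  if prices.isEmpty then (names, List.replicate dishes.length "NOT GIVEN")
  else
    let final := prices.foldl (pvPricePass dishes) (dishes.map (fun _ => (none, "")))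
    (names, final.map (fun st => st.2))

-- ===== PRECONDITION & SPEC =====
def Spec_match_price (dishes : List (String × (Int × Int))) (prices : List (String × (Int × Int))) (out : List String × List String) : Prop := out = match_price_alt dishes prices
instance (dishes : List (String × (Int × Int))) (prices : List (String × (Int × Int))) (out : List String × List String) : Decidable (Spec_match_price dishes prices out) := by unfold Spec_match_price; infer_instance

-- ===== CLAIM (what is proved, stated in full; the proofs are below) =====
def Claim_equal_match_price : Prop := ∀ (dishes : List (String × (Int × Int))) (prices : List (String × (Int × Int))), Dom_match_price dishes prices → Spec_match_price dishes prices (match_price dishes prices)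

-- ===== LEMMAS AND PROOFS =====

-- distance of a price point from a fixed dish position
def pvDf (x y : Int) (p : String × (Int × Int)) : Int := (x - p.2.1)^2 + (y - p.2.2)^2

-- reference argmin: first price attaining the minimal distance, paired with that distance
def pvBest (x y : Int) : List (String × (Int × Int)) → Option (String × Int)
  | [] => none
  | p :: ps =>
      match pvBest x y ps with
      | none => some (p.1, pvDf x y p)
      | some (n, m) => if pvDf x y p ≤ m then some (p.1, pvDf x y p) else some (n, m)

theorem foldl_min_comm (l : List Int) (a b : Int) :
    l.foldl min (min a b) = min a (l.foldl min b) := by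
  induction l generalizing b with
  | nil => rfl
  | cons c t ih =>
      simp only [List.foldl_cons]
      rw [min_assoc, ih]

-- A's per-dish pipeline (min → index → prices[i]) computes pvBest's name
theorem pvA_pipeline (x y : Int) (p : String × (Int × Int)) (ps : List (String × (Int × Int))) :
    ∃ (i : Nat) (q : String × (Int × Int)) (m : Int),
      pvBest x y (p :: ps) = some (q.1, m) ∧
      PySem.List.min? ((p :: ps).map (pvDf x y)) (fun d => d) = some m ∧
      PySem.List.index? ((p :: ps).map (pvDf x y)) m = some i ∧
      PySem.List.pyGet? (p :: ps) (i : Int) = some q := by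
  induction ps generalizing p with
  | nil =>
      refine ⟨0, p, pvDf x y p, rfl, ?_, ?_, ?_⟩
      · simp [PySem.List.min?_id_cons]
      · simp
      · simp
  | cons q t ih =>
      obtain ⟨i', q', m', hbest, hmin, hidx, hget⟩ := ih q
      have hm' : m' = (t.map (pvDf x y)).foldl min (pvDf x y q) := by
        rw [List.map_cons, PySem.List.min?_id_cons] at hmin
        exact (Option.some.injEq _ _ ▸ hmin).symm
      have hfold : ((q :: t).map (pvDf x y)).foldl min (pvDf x y p) = min (pvDf x y p) m' := by
        rw [List.map_cons, List.foldl_cons, foldl_min_comm, ← hm']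
      by_cases h : pvDf x y p ≤ m'
      · refine ⟨0, p, pvDf x y p, ?_, ?_, ?_, ?_⟩
        · rw [pvBest, hbest]; dsimp only; rw [if_pos h]
        · rw [List.map_cons, PySem.List.min?_id_cons, hfold]
          congr 1
          omega
        · rw [List.map_cons, PySem.List.index?_cons_self]
        · simp
      · refine ⟨i' + 1, q', m', ?_, ?_, ?_, ?_⟩
        · rw [pvBest, hbest]; dsimp only; rw [if_neg h]
        · rw [List.map_cons, PySem.List.min?_id_cons, hfold]
          congr 1
          omega
        · rw [List.map_cons, PySem.List.index?_cons_of_ne _ (by omega), hidx]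
          rfl
        · push_cast
          rw [PySem.List.pyGet?_cons_succ, hget]

-- B's per-dish fold continued from a definite running state
theorem pvUpd_fold (nm : String) (x y : Int) (ps : List (String × (Int × Int))) (n : String) (bd : Int) :
    ps.foldl (fun a p => pvUpd p (nm, x, y) a) (some bd, n) =
      (match pvBest x y ps with
       | none => (some bd, n)
       | some (n', m) => if m < bd then (some m, n') else (some bd, n)) := by
  induction ps generalizing n bd with
  | nil => rfl
  | cons p t ih =>
      simp only [List.foldl_cons]
      rw [pvBest]
      have hstep : pvUpd p (nm, x, y) (some bd, n) =
          if pvDf x y p < bd then (some (pvDf x y p), p.1) else (some bd, n) := by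
        simp [pvUpd, pvDf]
      rw [hstep]
      by_cases h : pvDf x y p < bd
      · rw [if_pos h, ih]
        cases hb : pvBest x y t with
        | none => dsimp only; rw [if_pos h]
        | some nmv =>
            obtain ⟨n', m⟩ := nmv
            dsimp only
            by_cases h2 : pvDf x y p ≤ m
            · rw [if_pos h2]; dsimp only
              rw [if_neg (by omega), if_pos h]
            · rw [if_neg h2]; dsimp only
              rw [if_pos (by omega), if_pos (by omega)]
      · rw [if_neg h, ih]
        cases hb : pvBest x y t with
        | none => dsimp only; rw [if_neg h]
        | some nmv =>
            obtain ⟨n', m⟩ := nmv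
            dsimp only
            by_cases h2 : pvDf x y p ≤ m
            · rw [if_pos h2]; dsimp only
              rw [if_neg (by omega), if_neg (by omega)]
            · rw [if_neg h2]

-- B's whole per-dish column (fold over all prices from the blank state) computes pvBest's name
theorem pvB_column (nm : String) (x y : Int) (p : String × (Int × Int)) (ps : List (String × (Int × Int))) :
    ∃ m, pvBest x y (p :: ps) =
      some (((p :: ps).foldl (fun a q => pvUpd q (nm, x, y) a) ((none : Option Int), "")).2, m) := by
  simp only [List.foldl_cons]
  have hstep : pvUpd p (nm, x, y) ((none : Option Int), "") = (some (pvDf x y p), p.1) := by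
    simp [pvUpd, pvDf]
  rw [hstep, pvUpd_fold, pvBest]
  cases hb : pvBest x y ps with
  | none => exact ⟨pvDf x y p, rfl⟩
  | some nmv =>
      obtain ⟨n', m⟩ := nmv
      dsimp only
      by_cases h2 : pvDf x y p ≤ m
      · rw [if_pos h2, if_neg (by omega)]
        exact ⟨pvDf x y p, rfl⟩
      · rw [if_neg h2, if_pos (by omega)]
        exact ⟨m, rfl⟩

-- one price-pass on a cons state decomposes elementwise
theorem pvPass_cons (d : String × (Int × Int)) (t : List (String × (Int × Int)))
    (s : Option Int × String) (st : List (Option Int × String)) (p : String × (Int × Int)) :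
    pvPricePass (d :: t) (s :: st) p = pvUpd p d s :: pvPricePass t st p := rfl

-- the whole price-major fold decomposes into per-dish columns
theorem pvFold_cons (prices : List (String × (Int × Int))) (d : String × (Int × Int))
    (t : List (String × (Int × Int))) (s : Option Int × String) (st : List (Option Int × String)) :
    prices.foldl (pvPricePass (d :: t)) (s :: st) =
      (prices.foldl (fun a p => pvUpd p d a) s) :: prices.foldl (pvPricePass t) st := by
  induction prices generalizing s st with
  | nil => rfl
  | cons p ps ih =>
      simp only [List.foldl_cons, pvPass_cons]
      exact ih _ _

-- A's and B's per-dish price agree on nonempty prices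
theorem pv_price_eq (nm : String) (x y : Int) (p : String × (Int × Int)) (ps : List (String × (Int × Int))) :
    (((PySem.List.pyGet? (p :: ps)
        (((PySem.List.index? ((p :: ps).map (fun price => (x - price.2.1)^2 + (y - price.2.2)^2))
            ((PySem.List.min? ((p :: ps).map (fun price => (x - price.2.1)^2 + (y - price.2.2)^2)) (fun d => d)).getD 0)).getD 0 : Nat) : Int)).getD ("", 0, 0)).1)
    = ((p :: ps).foldl (fun a q => pvUpd q (nm, x, y) a) ((none : Option Int), "")).2 := by
  have hdf : (fun price : String × (Int × Int) => (x - price.2.1)^2 + (y - price.2.2)^2) = pvDf x y := rfl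
  obtain ⟨i, q, m, hbest, hmin, hidx, hget⟩ := pvA_pipeline x y p ps
  obtain ⟨m2, hbest2⟩ := pvB_column nm x y p ps
  rw [hbest] at hbest2
  have hq : q.1 = ((p :: ps).foldl (fun a q => pvUpd q (nm, x, y) a) ((none : Option Int), "")).2 :=
    congrArg Prod.fst (Option.some.injEq _ _ ▸ hbest2)
  rw [hdf, hmin, Option.getD_some, hidx, Option.getD_some, hget, Option.getD_some]
  exact hq

-- A's foldl with a seeded accumulator appends to the accumulator
theorem pvA_fold_acc (prices : List (String × (Int × Int))) (dishes : List (String × (Int × Int)))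
    (acc : List String × List String) :
    dishes.foldl (fun acc dish =>
      if prices.length == 0 then
        (acc.1 ++ [dish.1], acc.2 ++ ["NOT GIVEN"])
      else
        let distance := prices.map (fun price => (dish.2.1 - price.2.1)^2 + (dish.2.2 - price.2.2)^2)
        let m := (PySem.List.min? distance (fun d => d)).getD 0
        let inde := (PySem.List.index? distance m).getD 0
        (acc.1 ++ [dish.1], acc.2 ++ [((PySem.List.pyGet? prices (inde : Int)).getD ("", 0, 0)).1])) acc
    = (acc.1 ++ (match_price dishes prices).1, acc.2 ++ (match_price dishes prices).2) := by
  induction dishes generalizing acc with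
  | nil => simp [match_price]
  | cons d t ih =>
      simp only [List.foldl_cons]
      rw [ih]
      conv_rhs => rw [match_price]
      simp only [List.foldl_cons]
      rw [show (List.foldl _ _ t : List String × List String) = _ from ih _]
      by_cases h : prices.length == 0
      · simp only [if_pos h]
        simp
      · simp only [if_neg h]
        simp

-- the price-major fold over an empty dish list stays empty
theorem pvFold_nilD (prices : List (String × (Int × Int))) :
    prices.foldl (pvPricePass []) [] = [] := by
  induction prices with
  | nil => rfl
  | cons p ps ih => simpa [pvPricePass] using ih

-- the equivalence, with no domain hypothesis needed
theorem pv_main (dishes prices : List (String × (Int × Int))) :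
    match_price dishes prices = match_price_alt dishes prices := by
  induction dishes with
  | nil =>
      cases prices with
      | nil => rfl
      | cons p ps =>
          have h0 : pvPricePass [] [] p = [] := rfl
          simp [match_price, match_price_alt, h0, pvFold_nilD ps]
  | cons d t ih =>
      obtain ⟨name, x, y⟩ := d
      conv_lhs => rw [match_price]
      simp only [List.foldl_cons]
      rw [pvA_fold_acc, ih]
      cases prices with
      | nil =>
          simp [match_price_alt, List.replicate_succ]
      | cons p ps =>
          have hlen : (((p :: ps).length == 0) = false) := by simp
          have hemp : (((p :: ps).isEmpty) = false) := rfl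
          simp only [match_price_alt, hemp, hlen, Bool.false_eq_true, if_false, List.map_cons]
          rw [pvFold_cons]
          simp only [List.map_cons, List.nil_append, List.singleton_append, Prod.mk.injEq]
          refine ⟨trivial, ?_⟩
          congr 1
          exact pv_price_eq name x y p ps

-- ===== VERDICT (by name: the statement is the Claim_ definition above) =====
theorem match_price_spec : Claim_equal_match_price := by
  intro dishes prices _
  exact pv_main dishes prices
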